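-- pv_equiv track=rewrite | github.com/GoodEd/neet_knowledge_project | scripts/multi_model_review.py | has_critical_issues
-- ===== SOURCE A (Python) =====
-- def has_critical_issues(results: list[dict[str, str | None]]) -> bool:
--     ignored = {"none", "n/a", "na", "-", "no", "no issues"}
--     for result in results:
--         content = result.get("content") or ""
--         lines = str(content).splitlines()
--         for index, line in enumerate(lines):
--             normalized = line.strip().lower().strip(":")
--             if normalized not in {"critical", "## critical", "### critical"}:
--                 continue
--
--             for candidate in lines[index + 1 :]:
--                 stripped = candidate.strip()
--                 if not stripped:
--                     continue
--                 if stripped.startswith("#"):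
--                     break
--
--                 lowered = stripped.lower().lstrip("-*").strip()
--                 if lowered not in ignored:
--                     return True
--     return False
-- ===== SOURCE B (Python) =====
-- def has_critical_issues(results: list[dict[str, str | None]]) -> bool:
--     return any(_content_has_critical(result.get("content") or "") for result in results)
--
--
-- def _content_has_critical(content: str) -> bool:
--     ignored = {"none", "n/a", "na", "-", "no", "no issues"}
--     headers = {"critical", "## critical", "### critical"}
--     in_critical = False
--     for line in str(content).splitlines():
--         stripped = line.strip()
--         is_header = stripped.lower().strip(":") in headers
--         if in_critical and stripped:
--             if stripped.startswith("#"):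
--                 in_critical = is_header
--                 continue
--             if stripped.lower().lstrip("-*").strip() not in ignored:
--                 return True
--             continue
--         if is_header:
--             in_critical = True
--     return False
-- ===== Notes on version B (the rewrite author's own statement) =====
-- stated objective: alternative
-- what changed: A restarts a scan of the remaining lines at every 'critical' header (quadratic per content in the worst case); B makes a single forward pass per content carrying an in_critical flag that is set by header lines and cleared by non-header '#' lines.
import Mathlib
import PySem

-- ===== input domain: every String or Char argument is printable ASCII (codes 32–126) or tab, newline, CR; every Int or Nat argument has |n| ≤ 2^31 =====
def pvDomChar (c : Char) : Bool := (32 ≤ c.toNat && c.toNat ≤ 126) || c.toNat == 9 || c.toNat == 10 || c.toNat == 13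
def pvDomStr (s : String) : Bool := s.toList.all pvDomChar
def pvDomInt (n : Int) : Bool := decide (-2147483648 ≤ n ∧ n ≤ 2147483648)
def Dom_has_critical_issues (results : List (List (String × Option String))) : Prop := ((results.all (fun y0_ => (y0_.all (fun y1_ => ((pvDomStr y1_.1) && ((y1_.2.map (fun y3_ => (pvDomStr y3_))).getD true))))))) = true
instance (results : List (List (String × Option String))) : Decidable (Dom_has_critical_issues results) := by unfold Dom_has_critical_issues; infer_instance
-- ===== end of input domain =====

-- B replaces A's restart-from-every-header rescans of the remaining lines by one forward pass
-- carrying an in_critical flag; same return value everywhere.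

-- ===== PORT A =====
def pvIgnored : List String := ["none", "n/a", "na", "-", "no", "no issues"]
def pvHeaders : List String := ["critical", "## critical", "### critical"]
-- hand port of Python's s.lstrip("-*"): drop leading '-' / '*' characters (exact)
def pvLstripDashStar (s : String) : String :=
  String.ofList (s.toList.dropWhile (fun c => c == '-' || c == '*'))

-- inner 'for candidate in lines[index+1:]' loop of A
def pvInnerA : List String → Bool
  | [] => false
  | c :: rest =>
    let stripped := PySem.Str.strip c
    if stripped == "" then pvInnerA rest
    else if PySem.Str.startswith stripped "#" then false
    else
      let lowered := PySem.Str.strip (pvLstripDashStar (PySem.Str.lower stripped))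
      if pvIgnored.contains lowered then pvInnerA rest else true

-- outer 'for index, line in enumerate(lines)' loop of A
def pvOuterA (lines : List String) : List (Int × String) → Bool
  | [] => false
  | (i, line) :: rest =>
    let normalized := PySem.Str.stripChars (PySem.Str.lower (PySem.Str.strip line)) ":"
    if pvHeaders.contains normalized then
      if pvInnerA (PySem.List.slice lines (some (i + 1)) none) then true
      else pvOuterA lines rest
    else pvOuterA lines rest

def has_critical_issues (results : List (List (String × Option String))) : Bool :=
  match results with
  | [] => false
  | r :: rest =>
    let content := match List.lookup "content" r with
      | some (some s) => s
      | _ => ""                      -- result.get("content") or ""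
    let lines := PySem.Str.splitlines content
    if pvOuterA lines (PySem.List.enumerate lines) then true
    else has_critical_issues rest

-- ===== PORT B =====
def pvIgnoredB : List String := ["none", "n/a", "na", "-", "no", "no issues"]
def pvHeadersB : List String := ["critical", "## critical", "### critical"]
-- hand port of Python's s.lstrip("-*"): drop leading '-' / '*' characters (exact)
def pvLstripDashStarB (s : String) : String :=
  String.ofList (s.toList.dropWhile (fun c => c == '-' || c == '*'))
-- single forward pass over the lines, carrying the in_critical flag
def pvScanB : Bool → List String → Bool
  | _, [] => false
  | inCrit, line :: rest =>
    let stripped := PySem.Str.strip line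
    let isHeader := pvHeadersB.contains (PySem.Str.stripChars (PySem.Str.lower stripped) ":")
    if inCrit && !(stripped == "") then
      if PySem.Str.startswith stripped "#" then pvScanB isHeader rest
      else if pvIgnoredB.contains (PySem.Str.strip (pvLstripDashStarB (PySem.Str.lower stripped))) then
        pvScanB inCrit rest
      else true
    else pvScanB (isHeader || inCrit) rest

def has_critical_issues_alt (results : List (List (String × Option String))) : Bool :=
  results.any (fun r =>
    pvScanB false (PySem.Str.splitlines (((List.lookup "content" r).getD none).getD "")))

-- ===== PRECONDITION & SPEC =====
def Spec_has_critical_issues (results : List (List (String × Option String))) (out : Bool) : Prop := out = has_critical_issues_alt results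
instance (results : List (List (String × Option String))) (out : Bool) : Decidable (Spec_has_critical_issues results out) := by unfold Spec_has_critical_issues; infer_instance

-- ===== CLAIM (what is proved, stated in full; the proofs are below) =====
def Claim_equal_has_critical_issues : Prop := ∀ (results : List (List (String × Option String))), Dom_has_critical_issues results → Spec_has_critical_issues results (has_critical_issues results)

-- ===== LEMMAS AND PROOFS =====

theorem headersB_eq : pvHeadersB = pvHeaders := rfl
theorem ignoredB_eq : pvIgnoredB = pvIgnored := rfl
theorem lstripB_eq : pvLstripDashStarB = pvLstripDashStar := rfl

-- A's outer loop, stripped of indices: at each line, if it is a header run the inner scan on the tail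
def pvSimpA : List String → Bool
  | [] => false
  | l :: rest =>
    (if pvHeaders.contains (PySem.Str.stripChars (PySem.Str.lower (PySem.Str.strip l)) ":")
     then pvInnerA rest else false) || pvSimpA rest

theorem outerA_eq_simpA (rest pre : List String) :
    pvOuterA (pre ++ rest) (PySem.List.enumerate rest pre.length) = pvSimpA rest := by
  induction rest generalizing pre with
  | nil => simp [PySem.List.enumerate, pvOuterA, pvSimpA]
  | cons l t ih =>
    have hslice : PySem.List.slice (pre ++ l :: t) (some ((pre.length : Int) + 1)) none = t := by
      rw [PySem.List.slice_from _ (by positivity)]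
      have h1 : ((pre.length : Int) + 1).toNat = (pre ++ [l]).length := by
        simp [Int.toNat_natCast]
      rw [h1, show pre ++ l :: t = (pre ++ [l]) ++ t by simp]
      exact List.drop_left
    have ih' : pvOuterA (pre ++ l :: t) (PySem.List.enumerate t ((pre.length : Int) + 1)) = pvSimpA t := by
      simpa using ih (pre ++ [l])
    simp only [PySem.List.enumerate, pvOuterA, pvSimpA, hslice]
    rw [ih']
    split_ifs <;> simp_all

theorem scanB_eq (lines : List String) (flag : Bool) :
    pvScanB flag lines = ((flag && pvInnerA lines) || pvSimpA lines) := by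
  induction lines generalizing flag with
  | nil => simp [pvScanB, pvInnerA, pvSimpA]
  | cons l t ih =>
    simp only [pvScanB, pvInnerA, pvSimpA, headersB_eq, ignoredB_eq, lstripB_eq]
    by_cases hb : PySem.Str.strip l == "" <;>
      by_cases hh : PySem.Str.startswith (PySem.Str.strip l) "#" = true <;>
        by_cases hi : pvIgnored.contains
          (PySem.Str.strip (pvLstripDashStar (PySem.Str.lower (PySem.Str.strip l)))) = true <;>
          cases flag <;>
            simp_all [ih, Bool.or_assoc, Bool.or_comm, Bool.or_left_comm, Bool.and_or_distrib_left]
    all_goals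
      cases h : pvHeaders.contains (PySem.Str.stripChars (PySem.Str.lower (PySem.Str.strip l)) ":") <;>
        simp_all [Bool.or_assoc, Bool.or_comm, Bool.or_left_comm]

-- per-content agreement
theorem content_agree (lines : List String) :
    pvOuterA lines (PySem.List.enumerate lines) = pvScanB false lines := by
  have h := outerA_eq_simpA lines []
  simp only [List.nil_append, List.length_nil, Nat.cast_zero] at h
  rw [scanB_eq]
  simpa using h

-- ===== VERDICT (by name: the statement is the Claim_ definition above) =====
theorem content_eq (r : List (String × Option String)) :
    (match List.lookup "content" r with
      | some (some s) => s
      | _ => "") = ((List.lookup "content" r).getD none).getD "" := by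
  rcases h : List.lookup "content" r with _ | (_ | s) <;> simp

theorem ports_agree (results : List (List (String × Option String))) :
    has_critical_issues results = has_critical_issues_alt results := by
  induction results with
  | nil => rfl
  | cons r rest ih =>
    simp only [has_critical_issues, has_critical_issues_alt, List.any_cons, content_agree,
      content_eq] at *
    split_ifs with h <;> simp_all

theorem has_critical_issues_spec : Claim_equal_has_critical_issues := by
  intro results _
  exact ports_agree results
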